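-- pv_equiv track=rewrite | github.com/yujiex/energyMap | myString.py | parseHelper
-- ===== SOURCE A (Python) =====
-- def parseHelper(string, sep, acc):
--     if not sep in string:
--         acc.append(string)
--         return acc
--     idx = string.index(sep)
--     newString = string[(idx + 1):]
--     seg = string[:idx]
--     acc.append(seg)
--     return parseHelper(newString, sep, acc)
-- ===== SOURCE B (Python) =====
-- def parseHelper(string, sep, acc):
--     idx = string.find(sep)
--     while idx >= 0:
--         acc.append(string[:idx])
--         string = string[idx + 1:]
--         idx = string.find(sep)
--     acc.append(string)
--     return acc
-- ===== Notes on version B (the rewrite author's own statement) =====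
-- stated objective: simpler
-- what changed: Replaces recursion (with `sep in string` plus string.index) by a flat while-loop using str.find, appending the tail after the loop; same segments, no recursion depth.
import Mathlib
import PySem

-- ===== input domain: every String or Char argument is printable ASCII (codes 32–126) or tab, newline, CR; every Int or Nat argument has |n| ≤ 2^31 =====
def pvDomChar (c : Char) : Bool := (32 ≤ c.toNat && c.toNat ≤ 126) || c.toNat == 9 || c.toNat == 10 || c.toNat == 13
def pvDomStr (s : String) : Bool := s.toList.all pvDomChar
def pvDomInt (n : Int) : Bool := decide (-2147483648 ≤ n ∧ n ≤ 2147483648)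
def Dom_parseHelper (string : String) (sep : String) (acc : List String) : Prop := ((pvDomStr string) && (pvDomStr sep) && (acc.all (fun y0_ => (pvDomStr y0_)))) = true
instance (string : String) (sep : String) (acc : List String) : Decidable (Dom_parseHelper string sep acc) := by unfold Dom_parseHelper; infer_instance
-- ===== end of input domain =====

-- B replaces A's recursion by a flat while-loop using str.find (simpler); return value proved equal for sep ≠ "".
-- Both Pythons mutate acc in place; the mutation is the same, equivalence here is about the return value.

-- ===== PORT A =====
-- A's recursion, on List Char, with fuel as a totality guard only (never exhausted when sep ≠ "", see the proofs).
def parseHelperGoA : Nat → List Char → List Char → List String → List String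
  | 0, _, _, acc => acc
  | fuel + 1, s, sep, acc =>
    if PySem.Chars.isIn sep s = false then
      acc ++ [String.ofList s]
    else
      let idx : Int := PySem.Chars.find s sep   -- string.index(sep), guarded by `sep in string`
      let newString := PySem.Chars.slice s (some (idx + 1)) none
      let seg := PySem.Chars.slice s none (some idx)
      parseHelperGoA fuel newString sep (acc ++ [String.ofList seg])

def parseHelper (string : String) (sep : String) (acc : List String) : List String :=
  parseHelperGoA (string.toList.length + 1) string.toList sep.toList acc

-- ===== PORT B =====
-- B's while-loop as a tail recursion returning the loop state (remaining string, acc); the tail is appended after the loop.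
def parseHelperLoopB : Nat → List Char → List Char → List String → (List Char × List String)
  | 0, s, _, acc => (s, acc)
  | fuel + 1, s, sep, acc =>
    let idx : Int := PySem.Chars.find s sep
    if idx < 0 then (s, acc)
    else parseHelperLoopB fuel (PySem.Chars.slice s (some (idx + 1)) none) sep
           (acc ++ [String.ofList (PySem.Chars.slice s none (some idx))])

def parseHelper_alt (string : String) (sep : String) (acc : List String) : List String :=
  let st := parseHelperLoopB (string.toList.length + 1) string.toList sep.toList acc
  st.2 ++ [String.ofList st.1]

-- ===== PRECONDITION & SPEC =====
-- Pre_ excludes only sep = "", on which A recurses forever (RecursionError) and B's loop never terminates.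
def Pre_parseHelper (string : String) (sep : String) (acc : List String) : Prop := sep ≠ ""
instance (string : String) (sep : String) (acc : List String) : Decidable (Pre_parseHelper string sep acc) := by unfold Pre_parseHelper; infer_instance

def pvWitness_parseHelper : String × String × List String := ("a,b,c", ",", ["z"])

def Spec_parseHelper (string : String) (sep : String) (acc : List String) (out : List String) : Prop := out = parseHelper_alt string sep acc
instance (string : String) (sep : String) (acc : List String) (out : List String) : Decidable (Spec_parseHelper string sep acc out) := by unfold Spec_parseHelper; infer_instance

-- ===== CLAIM (what is proved, stated in full; the proofs are below) =====
def Claim_equal_parseHelper : Prop := ∀ (string : String) (sep : String) (acc : List String), Dom_parseHelper string sep acc → Pre_parseHelper string sep acc → Spec_parseHelper string sep acc (parseHelper string sep acc)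

-- ===== LEMMAS AND PROOFS =====

-- With sep nonempty and enough fuel, A's recursion equals B's loop followed by the final append.
theorem goA_eq_loopB (fuel : Nat) (s sep : List Char) (acc : List String)
    (hsep : sep ≠ []) (hf : s.length < fuel) :
    parseHelperGoA fuel s sep acc =
      (parseHelperLoopB fuel s sep acc).2 ++ [String.ofList (parseHelperLoopB fuel s sep acc).1] := by
  induction fuel generalizing s acc with
  | zero => omega
  | succ f ih =>
    by_cases h : PySem.Chars.isIn sep s = false
    · have hfind : PySem.Chars.find s sep = -1 := by
        rw [PySem.Chars.find_eq_neg_one_iff]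
        rw [PySem.Chars.isIn_eq_false_iff] at h
        exact h
      simp [parseHelperGoA, parseHelperLoopB, h, hfind]
    · have hIn : PySem.Chars.isIn sep s = true := by
        cases hx : PySem.Chars.isIn sep s
        · exact absurd hx h
        · rfl
      have hfind : 0 ≤ PySem.Chars.find s sep := by
        rw [PySem.Chars.find_nonneg_iff]
        exact (PySem.Chars.isIn_iff_infix sep s).mp hIn
      have hne : s ≠ [] := by
        intro hnil
        subst hnil
        have := (PySem.Chars.isIn_iff_infix sep []).mp hIn
        simp at this
        exact hsep this
      have hlen : 0 < s.length := List.length_pos_of_ne_nil hne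
      have hdrop :
          (PySem.Chars.slice s (some (PySem.Chars.find s sep + 1)) none).length < f := by
        have h1 : (0:Int) ≤ PySem.Chars.find s sep + 1 := by omega
        rw [PySem.Chars.slice_eq_listSlice, PySem.List.slice_from s h1]
        have : (PySem.Chars.find s sep + 1).toNat ≥ 1 := by omega
        simp [List.length_drop]
        omega
      simp only [parseHelperGoA, parseHelperLoopB, h]
      have hneg : ¬ (PySem.Chars.find s sep < 0) := by omega
      simp only [hneg]
      exact ih _ _ hdrop
    
-- ===== VERDICT (by name: the statement is the Claim_ definition above) =====
theorem parseHelper_spec : Claim_equal_parseHelper := by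
  intro string sep acc _ hpre
  unfold Spec_parseHelper parseHelper parseHelper_alt
  have hsep : sep.toList ≠ [] := by
    intro h
    exact hpre (by simpa using congrArg String.ofList h)
  exact goA_eq_loopB _ _ _ _ hsep (by omega)
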